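-- pv_equiv track=rewrite | github.com/kmathl96/Algorithm | programmers/level2/86048.py | solution
-- ===== SOURCE A (Python) =====
-- def solution(enter, leave):
--     answer = [0]*len(enter)
--     st = [] # 입실해있는 사람
--     idx = 0 # 입실할 사람의 인덱스 값
--
--     # 퇴실 순서대로 확인
--     for num in leave:
--
--         # 아직 입실하지 않은 경우, 해당 사람이 입실할 때까지 입실 반복
--         while num not in st:
--             st.append(enter[idx]) # 입실 순서대로 입실
--             idx += 1 # 다음 입실할 사람
--
--         st.pop(st.index(num)) # 퇴실
--
--         # 마주친 사람들 횟수 세기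
--         for n in st:
--             answer[n-1] += 1
--             answer[num-1] += 1
--     return answer
-- ===== SOURCE B (Python) =====
-- def solution(enter, leave):
--     # O(n): lazy-entry prefix maximum; each person's greeting count is
--     # (prefix max of entry indices at their leave event) - (event at which they entered).
--     E = {}
--     for i, p in enumerate(enter):
--         E[p] = i
--     answer = [0] * len(enter)
--     m = -1          # highest entry index admitted so far
--     entry_ev = {}   # person -> leave-event index at which they entered the room
--     for t, num in enumerate(leave):
--         e = E[num]
--         if e > m:
--             for j in range(m + 1, e + 1):
--                 entry_ev[enter[j]] = t
--             m = e
--         answer[num - 1] = m - entry_ev[num]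
--     return answer
-- ===== Notes on version B (the rewrite author's own statement) =====
-- stated objective: alternative
-- what changed: A simulates the room with a list (membership scans, list.index/pop, and a per-event loop over everyone still present); B never builds the room: one pass keeps the running maximum of entry indices and the event at which each person entered, and each person's count is exactly (that prefix maximum at their leave event) minus (their entry event).
-- outside the precondition, e.g. on solution([0, 2], [2, 0]): A returns [0, 2], B returns [0, 1]; on solution([7], [7]): A returns [0], B raises IndexError
import Mathlib
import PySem

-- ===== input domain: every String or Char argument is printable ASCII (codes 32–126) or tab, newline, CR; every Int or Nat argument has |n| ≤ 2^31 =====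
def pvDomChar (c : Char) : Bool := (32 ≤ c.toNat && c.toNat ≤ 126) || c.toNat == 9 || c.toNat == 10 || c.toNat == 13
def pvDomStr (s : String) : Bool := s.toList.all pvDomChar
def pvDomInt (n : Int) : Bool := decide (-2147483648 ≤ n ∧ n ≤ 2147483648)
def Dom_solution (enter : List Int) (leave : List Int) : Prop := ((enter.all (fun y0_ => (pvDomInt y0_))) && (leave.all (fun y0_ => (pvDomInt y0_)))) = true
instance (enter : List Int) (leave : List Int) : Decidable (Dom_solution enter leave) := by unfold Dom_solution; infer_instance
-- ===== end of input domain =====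

-- B replaces A's room simulation (membership scans, list.index/pop, and a per-event loop over
-- everyone still present) by a single arithmetic pass: each person's count is (prefix max of entry
-- indices at their leave event) minus (the leave event at which they entered). Return value only.

-- ===== PORT A =====
-- 'while num not in st: st.append(enter[idx]); idx += 1'
-- (when idx runs past enter, Python raises IndexError — outside Pre_solution; the port stops there)
def solWhile (enter : List Int) (num : Int) (st : List Int) (idx : Nat) : List Int × Nat :=
  if num ∈ st then (st, idx)
  else if h : idx < enter.length then
    solWhile enter num (st ++ [enter[idx]]) (idx + 1)
  else (st, idx)
termination_by enter.length - idx

def stepA (enter : List Int) (acc : List Int × List Int × Nat) (num : Int) : List Int × List Int × Nat :=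
  let p := solWhile enter num acc.2.1 acc.2.2
  -- st.pop(st.index(num)); after the while loop num ∈ st on Pre_ (none = Python ValueError, excluded)
  let st2 := match PySem.List.index? p.1 num with
    | some i => ((PySem.List.pop? p.1 (i : Int)).map Prod.snd).getD p.1
    | none => p.1
  -- for n in st: answer[n-1] += 1; answer[num-1] += 1   (pySetD: out-of-range = Python IndexError, excluded by Pre_)
  let ans2 := st2.foldl (fun a q =>
      let a1 := PySem.List.pySetD a (q - 1) (PySem.List.pyGetD a (q - 1) 0 + 1)
      PySem.List.pySetD a1 (num - 1) (PySem.List.pyGetD a1 (num - 1) 0 + 1)) acc.1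
  (ans2, st2, p.2)

def solution (enter : List Int) (leave : List Int) : List Int :=
  (leave.foldl (stepA enter) (List.replicate enter.length 0, [], 0)).1

-- ===== PORT B =====
def stepB (enter : List Int) (E : PySem.Dict Int Int)
    (acc : List Int × Int × PySem.Dict Int Int) (tn : Int × Int) : List Int × Int × PySem.Dict Int Int :=
  let t := tn.1
  let num := tn.2
  let e := (E.get? num).getD 0   -- E[num]; none = Python KeyError, outside Pre_solution
  let me :=
    if e > acc.2.1 then
      (e, (PySem.List.pyRange (acc.2.1 + 1) (e + 1) 1).foldl
            (fun d j => d.insert (PySem.List.pyGetD enter j 0) t) acc.2.2)  -- enter[j] in range on Pre_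
    else (acc.2.1, acc.2.2)
  -- answer[num-1] = m - entry_ev[num]   (the lookup is some on Pre_)
  let a2 := PySem.List.pySetD acc.1 (num - 1) (me.1 - ((me.2.get? num).getD 0))
  (a2, me.1, me.2)

def solution_alt (enter : List Int) (leave : List Int) : List Int :=
  let E := (PySem.List.enumerate enter 0).foldl (fun d ip => d.insert ip.2 ip.1) PySem.Dict.empty
  ((PySem.List.enumerate leave 0).foldl (stepB enter E)
    (List.replicate enter.length 0, -1, PySem.Dict.empty)).1

-- ===== PRECONDITION & SPEC =====
-- Pre_: either nobody leaves (leave = [], where A returns [0]*n for any enter), or enter is a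
-- permutation of 1..n and leave a permutation of enter (the problem's stated domain). Outside it A
-- raises (IndexError/ValueError) or returns accidental values through Python's negative-index
-- wraparound on answer[num-1] (an artefact of A's implementation, on which B may raise or differ).
def Pre_solution (enter : List Int) (leave : List Int) : Prop :=
  leave = [] ∨
    (enter.Perm ((List.range enter.length).map (fun i : Nat => (i : Int) + 1)) ∧ leave.Perm enter)
instance (enter : List Int) (leave : List Int) : Decidable (Pre_solution enter leave) := by
  unfold Pre_solution; infer_instance

def pvWitness_solution : List Int × List Int := ([1, 3, 2], [3, 1, 2])

def Spec_solution (enter : List Int) (leave : List Int) (out : List Int) : Prop := out = solution_alt enter leave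
instance (enter : List Int) (leave : List Int) (out : List Int) : Decidable (Spec_solution enter leave out) := by unfold Spec_solution; infer_instance

-- ===== CLAIM (what is proved, stated in full; the proofs are below) =====
def Claim_equal_solution : Prop := ∀ (enter : List Int) (leave : List Int), Dom_solution enter leave → Pre_solution enter leave → Spec_solution enter leave (solution enter leave)

-- ===== LEMMAS AND PROOFS =====

-- ghost quantities describing both simulations:
-- eI: a person's index in enter; Mx t: highest entry index forced by the first t leave events;
-- ent t: how many people have entered after t leave events; tEnt: the leave event at which a person enters;
-- stS: A's room list; evS: B's entry-event dict; valA/valB: the answer entries of either side after t events.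
def eI (enter : List Int) (p : Int) : Nat := List.idxOf p enter

def Mx (enter leave : List Int) (t : Nat) : Int :=
  ((leave.take t).map (fun p => (eI enter p : Int))).foldl max (-1)

def ent (enter leave : List Int) (t : Nat) : Nat := (Mx enter leave t + 1).toNat

def tEnt (enter leave : List Int) (p : Int) : Nat :=
  leave.findIdx (fun q => decide (eI enter p ≤ eI enter q))

def stS (enter leave : List Int) (t : Nat) : List Int :=
  (enter.take (ent enter leave t)).filter (fun q => decide (q ∉ leave.take t))

def evS (enter leave : List Int) (t : Nat) : PySem.Dict Int Int :=
  PySem.Dict.mk ((enter.take (ent enter leave t)).map (fun q => (q, (tEnt enter leave q : Int))))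

def valA (enter leave : List Int) (t : Nat) (j : Nat) : Int :=
  if ((j : Int) + 1) ∈ leave.take t then
    Mx enter leave (List.idxOf ((j : Int) + 1) leave + 1) - tEnt enter leave ((j : Int) + 1)
  else if eI enter ((j : Int) + 1) < ent enter leave t then
    (t : Int) - tEnt enter leave ((j : Int) + 1)
  else 0

def ansA (enter leave : List Int) (t : Nat) : List Int :=
  (List.range enter.length).map (valA enter leave t)

def valB (enter leave : List Int) (t : Nat) (j : Nat) : Int :=
  if ((j : Int) + 1) ∈ leave.take t then
    Mx enter leave (List.idxOf ((j : Int) + 1) leave + 1) - tEnt enter leave ((j : Int) + 1)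
  else 0

def ansB (enter leave : List Int) (t : Nat) : List Int :=
  (List.range enter.length).map (valB enter leave t)

lemma le_foldl_max (l : List Int) (a : Int) : a ≤ l.foldl max a := by
  induction l generalizing a with
  | nil => simp
  | cons x l ih => exact le_trans (le_max_left a x) (ih (max a x))

lemma mem_le_foldl_max (l : List Int) (a x : Int) (hx : x ∈ l) : x ≤ l.foldl max a := by
  induction l generalizing a with
  | nil => simp at hx
  | cons y l ih =>
    rcases List.mem_cons.1 hx with rfl | hx
    · exact le_trans (le_max_right a x) (le_foldl_max l _)
    · exact ih _ hx

lemma foldl_max_lt (l : List Int) (a c : Int) (ha : a < c) (h : ∀ x ∈ l, x < c) :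
    l.foldl max a < c := by
  induction l generalizing a with
  | nil => simpa using ha
  | cons x l ih =>
    exact ih (max a x) (max_lt ha (h x (List.mem_cons_self))) (fun y hy => h y (List.mem_cons_of_mem _ hy))

lemma Mx_succ (enter leave : List Int) (t : Nat) (ht : t < leave.length) :
    Mx enter leave (t + 1) = max (Mx enter leave t) ((eI enter (leave[t]) : Int)) := by
  unfold Mx
  rw [List.take_add_one, List.getElem?_eq_getElem ht, List.map_append, List.foldl_append]
  rfl

lemma Mx_ge (enter leave : List Int) (t : Nat) : -1 ≤ Mx enter leave t := le_foldl_max _ _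

lemma ent_cast (enter leave : List Int) (t : Nat) :
    (ent enter leave t : Int) = Mx enter leave t + 1 := by
  have := Mx_ge enter leave t
  unfold ent
  omega

lemma Mx_mono (enter leave : List Int) {t t' : Nat} (h : t ≤ t') :
    Mx enter leave t ≤ Mx enter leave t' := by
  induction t' with
  | zero => simp_all
  | succ t' ih =>
    rcases Nat.lt_or_ge t' leave.length with hlt | hge
    · rcases Nat.eq_or_lt_of_le h with rfl | hlt2
      · exact le_refl _
      · exact le_trans (ih (by omega)) (by rw [Mx_succ enter leave t' hlt]; exact le_max_left _ _)
    · rcases Nat.eq_or_lt_of_le h with rfl | hlt2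
      · exact le_refl _
      · have : leave.take (t' + 1) = leave.take t' := by
          rw [List.take_of_length_le hge, List.take_of_length_le (by omega)]
        unfold Mx
        rw [this]
        exact ih (by omega)

lemma ent_mono (enter leave : List Int) {t t' : Nat} (h : t ≤ t') :
    ent enter leave t ≤ ent enter leave t' := by
  have h1 := Mx_mono enter leave h
  have h2 := ent_cast enter leave t
  have h3 := ent_cast enter leave t'
  omega

lemma eI_lt (enter : List Int) {p : Int} (hp : p ∈ enter) : eI enter p < enter.length :=
  List.idxOf_lt_length_iff.2 hp

lemma mem_take_iff (enter : List Int) {p : Int} (hp : p ∈ enter) (k : Nat) :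
    p ∈ enter.take k ↔ eI enter p < k := List.mem_take_iff_idxOf_lt hp

lemma ent_le_length (enter leave : List Int) (t : Nat) (ht : t ≤ leave.length)
    (hmem : ∀ p ∈ leave, p ∈ enter) : ent enter leave t ≤ enter.length := by
  have : Mx enter leave t < (enter.length : Int) := by
    apply foldl_max_lt
    · omega
    · intro x hx
      obtain ⟨p, hp, rfl⟩ := List.mem_map.1 hx
      have : p ∈ leave := List.mem_of_mem_take hp
      exact_mod_cast eI_lt enter (hmem p this)
  have := ent_cast enter leave t
  omega

lemma left_entered (enter leave : List Int) (t : Nat) {q : Int}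
    (hq : q ∈ leave.take t) (hqe : q ∈ enter) :
    eI enter q < ent enter leave t := by
  have h1 : ((eI enter q : Int)) ≤ Mx enter leave t :=
    mem_le_foldl_max _ _ _ (List.mem_map.2 ⟨q, hq, rfl⟩)
  have := ent_cast enter leave t
  omega

lemma tEnt_le_of (enter leave : List Int) {p : Int} {s : Nat} (hs : s < leave.length)
    (h : eI enter p ≤ eI enter (leave[s])) : tEnt enter leave p ≤ s := by
  unfold tEnt
  by_contra hc
  rw [Nat.not_le] at hc
  have h2 := List.not_of_lt_findIdx (p := fun q => decide (eI enter p ≤ eI enter q)) hc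
  rw [decide_eq_false_iff_not] at h2
  exact h2 h

lemma tEnt_eq_of (enter leave : List Int) {p : Int} {s : Nat} (hs : s < leave.length)
    (h1 : ent enter leave s ≤ eI enter p) (h2 : eI enter p < ent enter leave (s + 1)) :
    tEnt enter leave p = s := by
  have hc1 := ent_cast enter leave s
  have hc2 := ent_cast enter leave (s + 1)
  have hMs : Mx enter leave s < (eI enter p : Int) := by omega
  have hle : eI enter p ≤ eI enter (leave[s]) := by
    have := Mx_succ enter leave s hs
    have : ((eI enter p : Int)) ≤ max (Mx enter leave s) ((eI enter (leave[s]) : Int)) := by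
      rw [← this]; omega
    rcases max_cases (Mx enter leave s) ((eI enter (leave[s]) : Int)) with ⟨hm, _⟩ | ⟨hm, _⟩ <;>
      rw [hm] at this <;> omega
  have hub := tEnt_le_of enter leave hs hle
  rcases Nat.eq_or_lt_of_le hub with h | h
  · exact h
  · exfalso
    have hlen2 : tEnt enter leave p < leave.length := by omega
    have hpred : eI enter p ≤ eI enter (leave[tEnt enter leave p]'hlen2) := by
      have := List.findIdx_getElem (p := fun q => decide (eI enter p ≤ eI enter q))
        (xs := leave) (w := hlen2)
      rw [decide_eq_true_iff] at this
      exact this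
    have hmem' : (leave[tEnt enter leave p]'hlen2) ∈ leave.take s := by
      have hlt : tEnt enter leave p < (leave.take s).length := by simp; omega
      have : (leave.take s)[tEnt enter leave p]'hlt = leave[tEnt enter leave p]'hlen2 :=
        List.getElem_take
      rw [← this]; exact List.getElem_mem hlt
    have := mem_le_foldl_max ((leave.take s).map (fun q => (eI enter q : Int))) (-1)
      ((eI enter (leave[tEnt enter leave p]'hlen2) : Int)) (List.mem_map.2 ⟨_, hmem', rfl⟩)
    have hMx : ((eI enter (leave[tEnt enter leave p]'hlen2) : Int)) ≤ Mx enter leave s := this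
    omega

lemma countP_mem_eq_length : ∀ (l P : List Int), l.Nodup → P.Nodup → (∀ x ∈ P, x ∈ l) →
    l.countP (fun q => decide (q ∈ P)) = P.length := by
  intro l
  induction l with
  | nil =>
    intro P _ _ hsub
    have : P = [] := by
      cases P with
      | nil => rfl
      | cons x P => exact absurd (hsub x List.mem_cons_self) (List.not_mem_nil)
    simp [this]
  | cons x l ih =>
    intro P hnl hnP hsub
    have hxl : x ∉ l := (List.nodup_cons.1 hnl).1
    have hnl' : l.Nodup := (List.nodup_cons.1 hnl).2
    by_cases hxP : x ∈ P
    · rw [List.countP_cons, if_pos (by simpa using hxP)]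
      have h1 : l.countP (fun q => decide (q ∈ P)) = l.countP (fun q => decide (q ∈ P.erase x)) := by
        apply List.countP_congr
        intro q hq
        have hqx : q ≠ x := fun h => hxl (h ▸ hq)
        simp [List.mem_erase_of_ne hqx]
      have h2 : l.countP (fun q => decide (q ∈ P.erase x)) = (P.erase x).length := by
        apply ih _ hnl' (hnP.erase x)
        intro y hy
        have hyP : y ∈ P := List.mem_of_mem_erase hy
        have hyx : y ≠ x := (List.Nodup.mem_erase_iff hnP).1 hy |>.1
        rcases List.mem_cons.1 (hsub y hyP) with h | h
        · exact absurd h hyx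
        · exact h
      rw [h1, h2, List.length_erase_of_mem hxP]
      have := List.length_pos_of_mem hxP
      omega
    · rw [List.countP_cons, if_neg (by simpa using hxP)]
      have hsub' : ∀ y ∈ P, y ∈ l := by
        intro y hy
        rcases List.mem_cons.1 (hsub y hy) with h | h
        · exact absurd (h ▸ hy) hxP
        · exact h
      rw [ih P hnl' hnP hsub']
      omega

lemma length_stS (enter leave : List Int) (t : Nat) (ht : t ≤ leave.length)
    (hndE : enter.Nodup) (hndL : leave.Nodup) (hmem : ∀ p ∈ leave, p ∈ enter) :
    ((stS enter leave t).length : Int) = (ent enter leave t : Int) - t := by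
  unfold stS
  have hsub : ∀ x ∈ leave.take t, x ∈ enter.take (ent enter leave t) := by
    intro x hx
    have hxe : x ∈ enter := hmem x (List.mem_of_mem_take hx)
    exact (mem_take_iff enter hxe _).2 (left_entered enter leave t hx hxe)
  have hndTake : (enter.take (ent enter leave t)).Nodup :=
    (List.take_sublist _ _).nodup hndE
  have hndP : (leave.take t).Nodup := (List.take_sublist _ _).nodup hndL
  have hcount := countP_mem_eq_length (enter.take (ent enter leave t)) (leave.take t)
    hndTake hndP hsub
  have hsplit := List.length_eq_countP_add_countP (fun q => decide (q ∈ leave.take t))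
    (l := enter.take (ent enter leave t))
  have hfilter : (List.filter (fun q => decide (q ∉ leave.take t)) (enter.take (ent enter leave t))).length
      = (enter.take (ent enter leave t)).countP (fun q => decide (q ∉ leave.take t)) :=
    Eq.symm List.countP_eq_length_filter
  beta_reduce at hsplit
  have hcongr : (enter.take (ent enter leave t)).countP (fun a => decide ¬decide (a ∈ leave.take t) = true)
      = (enter.take (ent enter leave t)).countP (fun q => decide (q ∉ leave.take t)) := by
    apply List.countP_congr
    intro q _
    simp
  have hlen1 : (enter.take (ent enter leave t)).length = ent enter leave t :=
    List.length_take_of_le (ent_le_length enter leave t ht hmem)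
  have hlen2 : (leave.take t).length = t := List.length_take_of_le ht
  rw [hfilter]
  omega

lemma solWhile_eq (enter : List Int) (num : Int) (hndE : enter.Nodup) (hnum : num ∈ enter)
    (k : Nat) (P : List Int) (hnP : num ∉ P) (hPk : ∀ x ∈ P, eI enter x < k)
    (hk : k ≤ enter.length) :
    solWhile enter num ((enter.take k).filter (fun q => decide (q ∉ P))) k
      = ((enter.take (max k (eI enter num + 1))).filter (fun q => decide (q ∉ P)),
         max k (eI enter num + 1)) := by
  rw [solWhile]
  by_cases hmem : num ∈ (enter.take k).filter (fun q => decide (q ∉ P))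
  · rw [if_pos hmem]
    have h1 : eI enter num < k := by
      have := List.mem_of_mem_filter hmem
      exact (mem_take_iff enter hnum k).1 this
    have : max k (eI enter num + 1) = k := by omega
    rw [this]
  · rw [if_neg hmem]
    have hge : k ≤ eI enter num := by
      by_contra hc
      exact hmem (List.mem_filter.2 ⟨(mem_take_iff enter hnum k).2 (by omega), by simpa using hnP⟩)
    have hklt : k < enter.length := lt_of_le_of_lt hge (eI_lt enter hnum)
    rw [dif_pos hklt]
    have hstep : (enter.take k).filter (fun q => decide (q ∉ P)) ++ [enter[k]]
        = (enter.take (k + 1)).filter (fun q => decide (q ∉ P)) := by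
      rw [List.take_add_one, List.getElem?_eq_getElem hklt]
      rw [List.filter_append]
      congr 1
      have hkP : enter[k] ∉ P := by
        intro hin
        have := hPk _ hin
        have : eI enter (enter[k]) = k := hndE.idxOf_getElem k hklt
        omega
      simp [hkP]
    rw [hstep]
    have hrec := solWhile_eq enter num hndE hnum (k + 1) P hnP
      (fun x hx => lt_trans (hPk x hx) (by omega)) (by omega)
    rw [hrec]
    have : max (k + 1) (eI enter num + 1) = max k (eI enter num + 1) := by omega
    rw [this]
termination_by enter.length - k

lemma set_map_range {n : Nat} (f : Nat → Int) (k : Nat) (v : Int) :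
    (List.map f (List.range n)).set k v
      = List.map (fun j => if j = k then v else f j) (List.range n) := by
  apply List.ext_getElem
  · simp
  · intro i h1 h2
    simp only [List.getElem_set, List.getElem_map, List.getElem_range]
    by_cases hik : k = i
    · subst hik; simp
    · rw [if_neg hik, if_neg (fun h => hik h.symm)]

lemma getD_map_range' {n : Nat} (f : Nat → Int) (k : Nat) (hk : k < n) :
    PySem.List.pyGetD ((List.range n).map f) (k : Int) 0 = f k := by
  rw [PySem.List.pyGetD_natCast]
  exact PySem.List.getD_map_range f n k 0 hk

lemma setOne (n : Nat) (f : Nat → Int) (q : Int) (v : Int) (h1 : 1 ≤ q) (h2 : q ≤ (n : Int)) :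
    PySem.List.pySetD ((List.range n).map f) (q - 1) v
      = (List.range n).map (fun j : Nat => if ((j : Int) + 1) = q then v else f j) := by
  rw [PySem.List.pySetD_of_nonneg _ _ (by omega), set_map_range]
  apply List.map_congr_left
  intro j hj
  rw [List.mem_range] at hj
  have hiff : (j = (q - 1).toNat) ↔ ((j : Int) + 1 = q) := by omega
  by_cases hc : (j : Int) + 1 = q
  · rw [if_pos (hiff.2 hc), if_pos hc]
  · rw [if_neg (fun hh => hc (hiff.1 hh)), if_neg hc]

lemma incOne (n : Nat) (f : Nat → Int) (q : Int) (h1 : 1 ≤ q) (h2 : q ≤ (n : Int)) :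
    PySem.List.pySetD ((List.range n).map f) (q - 1)
        (PySem.List.pyGetD ((List.range n).map f) (q - 1) 0 + 1)
      = (List.range n).map (fun j => f j + (if ((j : Int) + 1) = q then 1 else 0)) := by
  have hk : ((q - 1).toNat : Int) = q - 1 := by omega
  have hkn : (q - 1).toNat < n := by omega
  have hg : PySem.List.pyGetD ((List.range n).map f) (q - 1) 0 = f (q - 1).toNat := by
    rw [← hk]; exact getD_map_range' f _ hkn
  rw [hg, setOne n f q _ h1 h2]
  apply List.map_congr_left
  intro j hj
  rw [List.mem_range] at hj
  by_cases hc : (j : Int) + 1 = q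
  · have : (q - 1).toNat = j := by omega
    rw [if_pos hc, if_pos hc, this]
  · rw [if_neg hc, if_neg hc]; ring

lemma incTwo (n : Nat) (f : Nat → Int) (q num : Int) (hq1 : 1 ≤ q) (hq2 : q ≤ (n : Int))
    (hn1 : 1 ≤ num) (hn2 : num ≤ (n : Int)) :
    (let a1 := PySem.List.pySetD ((List.range n).map f) (q - 1) (PySem.List.pyGetD ((List.range n).map f) (q - 1) 0 + 1);
      PySem.List.pySetD a1 (num - 1) (PySem.List.pyGetD a1 (num - 1) 0 + 1))
    = (List.range n).map (fun j => f j + (if ((j : Int) + 1) = q then 1 else 0)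
        + (if ((j : Int) + 1) = num then 1 else 0)) := by
  show PySem.List.pySetD _ (num - 1) (PySem.List.pyGetD _ (num - 1) 0 + 1) = _
  rw [incOne n f q hq1 hq2, incOne n _ num hn1 hn2]

lemma foldIncr (n : Nat) (num : Int) (hnum1 : 1 ≤ num) (hnum2 : num ≤ (n : Int)) :
    ∀ (st : List Int) (f : Nat → Int), (∀ q ∈ st, 1 ≤ q ∧ q ≤ (n : Int)) → num ∉ st → st.Nodup →
    st.foldl (fun a q =>
        let a1 := PySem.List.pySetD a (q - 1) (PySem.List.pyGetD a (q - 1) 0 + 1)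
        PySem.List.pySetD a1 (num - 1) (PySem.List.pyGetD a1 (num - 1) 0 + 1))
      ((List.range n).map f)
    = (List.range n).map (fun j => f j + (if ((j : Int) + 1) ∈ st then 1 else 0)
        + (if ((j : Int) + 1) = num then (st.length : Int) else 0)) := by
  intro st
  induction st with
  | nil =>
    intro f _ _ _
    simp
  | cons q st ih =>
    intro f hbound hnmem hnd
    have hq := hbound q List.mem_cons_self
    have hqnum : q ≠ num := fun h => hnmem (h ▸ List.mem_cons_self)
    have hqst : q ∉ st := (List.nodup_cons.1 hnd).1
    rw [List.foldl_cons]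
    rw [incTwo n f q num hq.1 hq.2 hnum1 hnum2]
    rw [ih _ (fun x hx => hbound x (List.mem_cons_of_mem _ hx))
        (fun hx => hnmem (List.mem_cons_of_mem _ hx)) (List.nodup_cons.1 hnd).2]
    apply List.map_congr_left
    intro j hj
    by_cases h1 : (j : Int) + 1 = q
    · have hn2' : ¬((j : Int) + 1 = num) := h1 ▸ hqnum
      have hn3 : ((j : Int) + 1) ∉ st := h1 ▸ hqst
      rw [if_pos h1, if_neg hn2', if_neg hn3, if_pos (List.mem_cons.2 (Or.inl h1)), if_neg hn2',
        if_neg hn2']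
      ring
    · by_cases h2 : (j : Int) + 1 = num
      · have hn3 : ((j : Int) + 1) ∉ st := h2 ▸ (fun hx => hnmem (List.mem_cons_of_mem _ hx))
        have hncons : ((j : Int) + 1) ∉ (q :: st) := fun hx =>
          (List.mem_cons.1 hx).elim h1 hn3
        rw [if_neg h1, if_pos h2, if_neg hn3, if_pos h2, if_neg hncons, if_pos h2]
        push_cast [List.length_cons]
        ring
      · rw [if_neg h1, if_neg h2, if_neg h2, if_neg h2]
        have hiff : (((j : Int) + 1) ∈ q :: st) ↔ (((j : Int) + 1) ∈ st) :=
          ⟨fun h => (List.mem_cons.1 h).resolve_left h1, fun h => List.mem_cons.2 (Or.inr h)⟩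
        by_cases h3 : ((j : Int) + 1) ∈ st
        · rw [if_pos h3, if_pos (hiff.2 h3)]; ring
        · rw [if_neg h3, if_neg (fun h => h3 (hiff.1 h))]; ring

lemma take_succ_leave (leave : List Int) (t : Nat) (ht : t < leave.length) :
    leave.take (t + 1) = leave.take t ++ [leave[t]] := by
  rw [List.take_add_one, List.getElem?_eq_getElem ht]
  rfl

lemma not_mem_take_self (leave : List Int) (hndL : leave.Nodup) (t : Nat) (ht : t < leave.length) :
    leave[t] ∉ leave.take t := by
  intro hmem'
  obtain ⟨i, hi, hieq⟩ := List.getElem_of_mem hmem'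
  have hi2 : i < t := by simp at hi; omega
  have hilen : i < leave.length := by omega
  rw [List.getElem_take] at hieq
  have h1 : List.idxOf (leave[i]'hilen) leave = i := hndL.idxOf_getElem i hilen
  have h2 : List.idxOf (leave[t]) leave = t := hndL.idxOf_getElem t ht
  rw [hieq] at h1
  omega

lemma eI_lt_ent_succ (enter leave : List Int) (t : Nat) (ht : t < leave.length) :
    eI enter (leave[t]) < ent enter leave (t + 1) := by
  have h1 := Mx_succ enter leave t ht
  have h2 := ent_cast enter leave (t + 1)
  omega

lemma valA_step (enter leave : List Int) (t : Nat) (ht : t < leave.length)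
    (hndE : enter.Nodup) (hndL : leave.Nodup) (hmem : ∀ p ∈ leave, p ∈ enter)
    (hmem2 : ∀ j : Nat, j < enter.length → ((j : Int) + 1) ∈ enter)
    (j : Nat) (hj : j < enter.length) :
    valA enter leave t j + (if ((j : Int) + 1) ∈ stS enter leave (t + 1) then 1 else 0)
      + (if ((j : Int) + 1) = leave[t] then ((stS enter leave (t + 1)).length : Int) else 0)
    = valA enter leave (t + 1) j := by
  have hpe : ((j : Int) + 1) ∈ enter := hmem2 j hj
  have htk := take_succ_leave leave t ht
  have hnt := not_mem_take_self leave hndL t ht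
  have hlst := length_stS enter leave (t + 1) (by omega) hndE hndL hmem
  have hct := ent_cast enter leave t
  have hct1 := ent_cast enter leave (t + 1)
  have hmono : ent enter leave t ≤ ent enter leave (t + 1) := ent_mono enter leave (by omega)
  have hei : eI enter (leave[t]) < ent enter leave (t + 1) := eI_lt_ent_succ enter leave t ht
  unfold valA
  by_cases hc1 : ((j : Int) + 1) = leave[t]
  · have hmemt1 : ((j : Int) + 1) ∈ leave.take (t + 1) := by
      rw [htk, hc1]; exact List.mem_append_right _ List.mem_cons_self
    have hnott : ((j : Int) + 1) ∉ leave.take t := hc1 ▸ hnt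
    have hnst : ((j : Int) + 1) ∉ stS enter leave (t + 1) := by
      intro hx
      have h := (List.mem_filter.1 hx).2
      rw [decide_eq_true_iff] at h
      exact h hmemt1
    have hidx : List.idxOf ((j : Int) + 1) leave = t := by
      rw [hc1]; exact hndL.idxOf_getElem t ht
    rw [if_neg hnott, if_pos hmemt1, if_neg hnst, if_pos hc1, hidx]
    by_cases hc2 : eI enter ((j : Int) + 1) < ent enter leave t
    · rw [if_pos hc2]
      omega
    · rw [if_neg hc2]
      have htEnt : tEnt enter leave ((j : Int) + 1) = t := by
        have h2' : eI enter ((j : Int) + 1) < ent enter leave (t + 1) := by rw [hc1]; exact hei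
        exact tEnt_eq_of enter leave ht (by omega) h2'
      rw [htEnt]
      omega
  · by_cases hcm : ((j : Int) + 1) ∈ stS enter leave (t + 1)
    · have hmem3 := List.mem_filter.1 hcm
      have heilt : eI enter ((j : Int) + 1) < ent enter leave (t + 1) :=
        (mem_take_iff enter hpe _).1 hmem3.1
      have hnotmem : ((j : Int) + 1) ∉ leave.take (t + 1) := by
        have h := hmem3.2
        rw [decide_eq_true_iff] at h
        exact h
      have hnott : ((j : Int) + 1) ∉ leave.take t := by
        intro hx; exact hnotmem (htk ▸ List.mem_append_left _ hx)
      rw [if_neg hnott, if_neg hnotmem, if_pos hcm, if_neg hc1, if_pos heilt]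
      by_cases hc2 : eI enter ((j : Int) + 1) < ent enter leave t
      · rw [if_pos hc2]
        push_cast
        ring
      · rw [if_neg hc2]
        have htEnt : tEnt enter leave ((j : Int) + 1) = t :=
          tEnt_eq_of enter leave ht (by omega) heilt
        rw [htEnt]
        push_cast
        omega
    · rw [if_neg hcm, if_neg hc1]
      by_cases hcl : ((j : Int) + 1) ∈ leave.take t
      · have hmt1 : ((j : Int) + 1) ∈ leave.take (t + 1) := htk ▸ List.mem_append_left _ hcl
        rw [if_pos hcl, if_pos hmt1]
        ring
      · have hnotmem : ((j : Int) + 1) ∉ leave.take (t + 1) := by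
          rw [htk]
          intro hx
          rcases List.mem_append.1 hx with h | h
          · exact hcl h
          · rcases List.mem_cons.1 h with h | h
            · exact hc1 h
            · simp at h
        have hnotei : ¬ eI enter ((j : Int) + 1) < ent enter leave (t + 1) := by
          intro hx
          exact hcm (List.mem_filter.2 ⟨(mem_take_iff enter hpe _).2 hx,
            decide_eq_true_iff.2 hnotmem⟩)
        rw [if_neg hcl, if_neg hnotmem, if_neg hnotei, if_neg (by omega)]
        ring

lemma stepA_eq (enter leave : List Int) (t : Nat) (ht : t < leave.length)
    (hndE : enter.Nodup) (hndL : leave.Nodup) (hmem : ∀ p ∈ leave, p ∈ enter)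
    (hval : ∀ p ∈ enter, 1 ≤ p ∧ p ≤ (enter.length : Int))
    (hmem2 : ∀ j : Nat, j < enter.length → ((j : Int) + 1) ∈ enter) :
    stepA enter (ansA enter leave t, stS enter leave t, ent enter leave t) (leave[t])
      = (ansA enter leave (t + 1), stS enter leave (t + 1), ent enter leave (t + 1)) := by
  have hnum : leave[t] ∈ enter := hmem _ (List.getElem_mem ht)
  have hnt := not_mem_take_self leave hndL t ht
  have hwhile := solWhile_eq enter (leave[t]) hndE hnum (ent enter leave t) (leave.take t) hnt
    (fun x hx => left_entered enter leave t hx (hmem x (List.mem_of_mem_take hx)))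
    (ent_le_length enter leave t (by omega) hmem)
  have hK : max (ent enter leave t) (eI enter (leave[t]) + 1) = ent enter leave (t + 1) := by
    have h1 := ent_cast enter leave t
    have h2 := ent_cast enter leave (t + 1)
    have h3 := Mx_succ enter leave t ht
    omega
  rw [hK] at hwhile
  have hmemst : leave[t] ∈ (enter.take (ent enter leave (t + 1))).filter
      (fun q => decide (q ∉ leave.take t)) := by
    exact List.mem_filter.2 ⟨(mem_take_iff enter hnum _).2 (eI_lt_ent_succ enter leave t ht),
      decide_eq_true_iff.2 hnt⟩
  have hndst : ((enter.take (ent enter leave (t + 1))).filter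
      (fun q => decide (q ∉ leave.take t))).Nodup :=
    (List.filter_sublist.trans (List.take_sublist _ _)).nodup hndE
  obtain ⟨i, hi⟩ := Option.isSome_iff_exists.1
    ((PySem.List.index?_isSome_iff _ _).2 hmemst)
  have hidx : i = List.idxOf (leave[t]) ((enter.take (ent enter leave (t + 1))).filter
      (fun q => decide (q ∉ leave.take t))) := by
    have h1 := List.idxOf_eq_getD_idxOf? (a := leave[t])
      (l := (enter.take (ent enter leave (t + 1))).filter (fun q => decide (q ∉ leave.take t)))
    rw [PySem.List.index?_eq_idxOf?] at hi
    rw [h1, hi]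
    rfl
  have hilt : i < ((enter.take (ent enter leave (t + 1))).filter
      (fun q => decide (q ∉ leave.take t))).length := by
    rw [hidx]; exact List.idxOf_lt_length_iff.2 hmemst
  have hpop : ((PySem.List.pop? ((enter.take (ent enter leave (t + 1))).filter
        (fun q => decide (q ∉ leave.take t))) (i : Int)).map Prod.snd).getD
        ((enter.take (ent enter leave (t + 1))).filter (fun q => decide (q ∉ leave.take t)))
      = stS enter leave (t + 1) := by
    rw [PySem.List.pop?_natCast _ i hilt]
    show List.eraseIdx _ i = _
    rw [hidx, List.eraseIdx_idxOf_eq_erase, hndst.erase_eq_filter, List.filter_filter]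
    unfold stS
    apply List.filter_congr
    intro x _
    by_cases h1 : x = leave[t]
    · subst h1
      have hmt : leave[t] ∈ leave.take (t + 1) := by
        rw [take_succ_leave leave t ht]; exact List.mem_append_right _ List.mem_cons_self
      simp [hmt]
    · by_cases h2 : x ∈ leave.take t
      · have hmt : x ∈ leave.take (t + 1) := by
          rw [take_succ_leave leave t ht]; exact List.mem_append_left _ h2
        simp [h2, hmt]
      · have hmt : x ∉ leave.take (t + 1) := by
          rw [take_succ_leave leave t ht]
          intro hx
          rcases List.mem_append.1 hx with h | h
          · exact h2 h
          · rcases List.mem_cons.1 h with h | h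
            · exact h1 h
            · simp at h
        simp [h1, h2, hmt]
  have hwhileF : solWhile enter (leave[t]) (stS enter leave t) (ent enter leave t)
      = ((enter.take (ent enter leave (t + 1))).filter (fun q => decide (q ∉ leave.take t)),
         ent enter leave (t + 1)) := by
    unfold stS
    exact hwhile
  unfold stepA
  simp only [hwhileF, hi, hpop]
  refine congrArg₂ Prod.mk ?_ (congrArg₂ Prod.mk rfl rfl)
  show (stS enter leave (t + 1)).foldl _ (ansA enter leave t) = _
  have hvb := hval _ hnum
  unfold ansA
  rw [foldIncr enter.length (leave[t]) hvb.1 hvb.2 (stS enter leave (t + 1)) (valA enter leave t)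
    (fun q hq => hval q (List.mem_of_mem_take (List.mem_of_mem_filter hq)))
    (fun hx => by
      have h := (List.mem_filter.1 hx).2
      rw [decide_eq_true_iff] at h
      exact h (by
        rw [take_succ_leave leave t ht]
        exact List.mem_append_right _ List.mem_cons_self))
    ((List.filter_sublist.trans (List.take_sublist _ _)).nodup hndE)]
  exact List.map_congr_left (fun j hj =>
    valA_step enter leave t ht hndE hndL hmem hmem2 j (List.mem_range.1 hj))

lemma foldA_eq (enter leave : List Int)
    (hndE : enter.Nodup) (hndL : leave.Nodup) (hmem : ∀ p ∈ leave, p ∈ enter)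
    (hval : ∀ p ∈ enter, 1 ≤ p ∧ p ≤ (enter.length : Int))
    (hmem2 : ∀ j : Nat, j < enter.length → ((j : Int) + 1) ∈ enter) :
    ∀ t, t ≤ leave.length →
      (leave.take t).foldl (stepA enter) (List.replicate enter.length 0, [], 0)
        = (ansA enter leave t, stS enter leave t, ent enter leave t) := by
  intro t
  induction t with
  | zero =>
    intro _
    rw [List.take_zero, List.foldl_nil]
    have h1 : ansA enter leave 0 = List.replicate enter.length 0 := by
      unfold ansA
      have hz : ∀ j ∈ List.range enter.length, valA enter leave 0 j = (fun _ => (0 : Int)) j := by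
        intro j _
        unfold valA
        rw [List.take_zero]
        have hz0 : ent enter leave 0 = 0 := rfl
        simp [hz0]
      rw [List.map_congr_left hz, List.map_const', List.length_range]
    rw [h1]
    rfl
  | succ t ih =>
    intro h
    rw [take_succ_leave leave t (by omega), List.foldl_append, ih (by omega),
      List.foldl_cons, List.foldl_nil]
    exact stepA_eq enter leave t (by omega) hndE hndL hmem hval hmem2

def Edict (enter : List Int) : PySem.Dict Int Int :=
  (PySem.List.enumerate enter 0).foldl (fun d ip => d.insert ip.2 ip.1) PySem.Dict.empty

lemma Edict_get (enter : List Int) (hndE : enter.Nodup) {p : Int} (hp : p ∈ enter) :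
    (Edict enter).get? p = some ((eI enter p : Int)) := by
  unfold Edict
  have hknd : ((PySem.List.enumerate enter 0).foldl (fun d ip => d.insert ip.2 ip.1)
      (PySem.Dict.empty : PySem.Dict Int Int)).keys.Nodup :=
    PySem.Dict.nodup_keys_foldl_insert_key _ _ _ _ PySem.Dict.nodup_keys_empty
  have hitems := PySem.Dict.items_foldl_insert_fresh (PySem.List.enumerate enter 0)
      (fun ip => ip.2) (fun ip => ip.1) (PySem.Dict.empty : PySem.Dict Int Int)
      (fun a _ => PySem.Dict.contains_empty _)
      (by rw [PySem.List.map_snd_enumerate]; exact hndE)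
  rw [PySem.Dict.get?_eq_some_iff_mem_items _ _ _ hknd, hitems]
  have hlt : eI enter p < enter.length := eI_lt enter hp
  have hgp : enter[eI enter p]'hlt = p := List.getElem_idxOf hlt
  have hmm : ((eI enter p : Int), p) ∈ PySem.List.enumerate enter 0 := by
    rw [PySem.List.mem_enumerate_iff]
    refine ⟨eI enter p, hlt, ?_⟩
    rw [hgp]
    simp
  rw [show (PySem.Dict.empty : PySem.Dict Int Int).items = [] from rfl, List.nil_append]
  exact List.mem_map.2 ⟨((eI enter p : Int), p), hmm, rfl⟩

lemma keys_evS (enter leave : List Int) (t : Nat) :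
    (evS enter leave t).keys = enter.take (ent enter leave t) := by
  unfold evS
  rw [PySem.Dict.keys_mk, List.map_map]
  have hid : ((fun (x : Int × Int) => x.1) ∘ fun q => (q, (tEnt enter leave q : Int))) = id := by
    funext q
    rfl
  rw [hid, List.map_id]

lemma evS_get (enter leave : List Int) (t : Nat) (hndE : enter.Nodup) {p : Int}
    (hp : p ∈ enter) (h : eI enter p < ent enter leave t) :
    (evS enter leave t).get? p = some ((tEnt enter leave p : Int)) := by
  have hknd : (evS enter leave t).keys.Nodup := by
    rw [keys_evS]; exact (List.take_sublist _ _).nodup hndE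
  rw [PySem.Dict.get?_eq_some_iff_mem_items _ _ _ hknd]
  show (p, (tEnt enter leave p : Int)) ∈ (enter.take (ent enter leave t)).map
    (fun q => (q, (tEnt enter leave q : Int)))
  exact List.mem_map.2 ⟨p, (mem_take_iff enter hp _).2 h, rfl⟩

lemma dict_fill (enter : List Int) (c : Int) :
    ∀ (cnt a : Nat) (d : PySem.Dict Int Int), a + cnt ≤ enter.length →
      (∀ k : Nat, a ≤ k → k < a + cnt → ∀ h : k < enter.length, d.contains (enter[k]) = false) →
      enter.Nodup →
      (PySem.List.pyRange (a : Int) ((a + cnt : Nat) : Int) 1).foldl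
          (fun d j => d.insert (PySem.List.pyGetD enter j 0) c) d
        = PySem.Dict.mk (d.items ++ ((enter.drop a).take cnt).map (fun q => (q, c))) := by
  intro cnt
  induction cnt with
  | zero =>
    intro a d hle hfresh hnd
    have hnil : PySem.List.pyRange (a : Int) ((a + 0 : Nat) : Int) 1 = [] := by
      rw [PySem.List.pyRange_of_pos _ _ (by omega : (0 : Int) < 1), if_neg (by omega)]
      simp
    rw [hnil, List.foldl_nil, List.take_zero, List.map_nil, List.append_nil]
  | succ cnt ih =>
    intro a d hle hfresh hnd
    have haL : a < enter.length := by omega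
    have hcons : PySem.List.pyRange (a : Int) ((a + (cnt + 1) : Nat) : Int) 1
        = (a : Int) :: PySem.List.pyRange ((a : Int) + 1) ((a + (cnt + 1) : Nat) : Int) 1 :=
      PySem.List.pyRange_one_cons (by push_cast; omega)
    rw [hcons, List.foldl_cons]
    have hgetA : PySem.List.pyGetD enter ((a : Nat) : Int) 0 = enter[a] := by
      rw [PySem.List.pyGetD_natCast, List.getD_eq_getElem?_getD, List.getElem?_eq_getElem haL]
      rfl
    rw [hgetA]
    have hfreshA : d.contains (enter[a]) = false := hfresh a (le_refl a) (by omega) haL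
    have hstep : ((a : Int) + 1) = ((a + 1 : Nat) : Int) := by push_cast; ring
    have harg : ((a + (cnt + 1) : Nat) : Int) = (((a + 1) + cnt : Nat) : Int) := by push_cast; ring
    rw [hstep, harg]
    have hfresh' : ∀ k : Nat, a + 1 ≤ k → k < (a + 1) + cnt → ∀ h : k < enter.length,
        (d.insert (enter[a]) c).contains (enter[k]) = false := by
      intro k hk1 hk2 hkl
      rw [PySem.Dict.contains_insert]
      have hne : enter[k] ≠ enter[a] := by
        intro heq
        have h1 := hnd.idxOf_getElem k hkl
        have h2 := hnd.idxOf_getElem a haL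
        rw [heq] at h1
        omega
      rw [hfresh k (by omega) (by omega) hkl]
      simp [hne]
    rw [ih (a + 1) (d.insert (enter[a]) c) (by omega) hfresh' hnd]
    rw [PySem.Dict.items_insert_of_not_contains _ _ hfreshA]
    have hdrop : enter.drop a = enter[a] :: enter.drop (a + 1) := List.drop_eq_getElem_cons haL
    rw [hdrop, List.take_succ_cons, List.map_cons]
    congr 1
    rw [List.append_assoc]
    rfl

lemma evS_fold (enter leave : List Int) (t : Nat) (ht : t < leave.length)
    (hndE : enter.Nodup) (hmem : ∀ p ∈ leave, p ∈ enter)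
    (hgt : ent enter leave t ≤ eI enter (leave[t])) :
    (PySem.List.pyRange (Mx enter leave t + 1) ((eI enter (leave[t]) : Int) + 1) 1).foldl
        (fun d j => d.insert (PySem.List.pyGetD enter j 0) ((t : Int))) (evS enter leave t)
      = evS enter leave (t + 1) := by
  have hct := ent_cast enter leave t
  have hct1 := ent_cast enter leave (t + 1)
  have hnum : leave[t] ∈ enter := hmem _ (List.getElem_mem ht)
  have helt : eI enter (leave[t]) < enter.length := eI_lt enter hnum
  have hmx := Mx_succ enter leave t ht
  have hent1 : ent enter leave (t + 1) = eI enter (leave[t]) + 1 := by omega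
  have h1 : Mx enter leave t + 1 = ((ent enter leave t : Nat) : Int) := by omega
  have h2 : (eI enter (leave[t]) : Int) + 1
      = ((ent enter leave t + (ent enter leave (t + 1) - ent enter leave t) : Nat) : Int) := by
    push_cast
    omega
  rw [h1, h2]
  have hfresh : ∀ k : Nat, ent enter leave t ≤ k →
      k < ent enter leave t + (ent enter leave (t + 1) - ent enter leave t) →
      ∀ h : k < enter.length, (evS enter leave t).contains (enter[k]) = false := by
    intro k hk1 hk2 hkl
    rw [PySem.Dict.contains_eq_decide_mem_keys, keys_evS, decide_eq_false_iff_not]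
    intro hmemk
    have hlt := (mem_take_iff enter (List.getElem_mem hkl) _).1 hmemk
    have heq : eI enter (enter[k]) = k := hndE.idxOf_getElem _ hkl
    omega
  rw [dict_fill enter ((t : Int)) (ent enter leave (t + 1) - ent enter leave t)
    (ent enter leave t) (evS enter leave t) (by omega) hfresh hndE]
  apply PySem.Dict.ext
  show (enter.take (ent enter leave t)).map _ ++ _ = (enter.take (ent enter leave (t + 1))).map _
  have htake : enter.take (ent enter leave (t + 1))
      = enter.take (ent enter leave t)
        ++ (enter.drop (ent enter leave t)).take (ent enter leave (t + 1) - ent enter leave t) := by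
    rw [← List.take_add]
    congr 1
    omega
  rw [htake, List.map_append]
  congr 1
  apply List.map_congr_left
  intro q hq
  obtain ⟨i, hi, hieq⟩ := List.getElem_of_mem hq
  have hbounds : i < ent enter leave (t + 1) - ent enter leave t ∧
      i < enter.length - ent enter leave t := by
    simp at hi
    omega
  have hia : ent enter leave t + i < enter.length := by omega
  have hq_eq : q = enter[ent enter leave t + i] := by
    rw [← hieq, List.getElem_take, List.getElem_drop]
  have heI : eI enter q = ent enter leave t + i := by
    rw [hq_eq]; exact hndE.idxOf_getElem _ hia
  have htEq : tEnt enter leave q = t := by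
    apply tEnt_eq_of enter leave ht <;> omega
  rw [htEq]

lemma valB_step (enter leave : List Int) (t : Nat) (ht : t < leave.length)
    (hndL : leave.Nodup) (j : Nat) :
    (if ((j : Int) + 1) = leave[t] then Mx enter leave (t + 1) - (tEnt enter leave (leave[t]) : Int)
     else valB enter leave t j) = valB enter leave (t + 1) j := by
  have htk := take_succ_leave leave t ht
  unfold valB
  by_cases hc1 : ((j : Int) + 1) = leave[t]
  · have hmemt1 : ((j : Int) + 1) ∈ leave.take (t + 1) := by
      rw [htk, hc1]; exact List.mem_append_right _ List.mem_cons_self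
    have hidx : List.idxOf ((j : Int) + 1) leave = t := by
      rw [hc1]; exact hndL.idxOf_getElem t ht
    rw [if_pos hc1, if_pos hmemt1, hidx, hc1]
  · rw [if_neg hc1]
    by_cases hcl : ((j : Int) + 1) ∈ leave.take t
    · have h2 : ((j : Int) + 1) ∈ leave.take (t + 1) := htk ▸ List.mem_append_left _ hcl
      rw [if_pos hcl, if_pos h2]
    · have h2 : ((j : Int) + 1) ∉ leave.take (t + 1) := by
        rw [htk]
        intro hx
        rcases List.mem_append.1 hx with h | h
        · exact hcl h
        · rcases List.mem_cons.1 h with h | h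
          · exact hc1 h
          · simp at h
      rw [if_neg hcl, if_neg h2]

lemma stepB_eq (enter leave : List Int) (t : Nat) (ht : t < leave.length)
    (hndE : enter.Nodup) (hndL : leave.Nodup) (hmem : ∀ p ∈ leave, p ∈ enter)
    (hval : ∀ p ∈ enter, 1 ≤ p ∧ p ≤ (enter.length : Int)) :
    stepB enter (Edict enter) (ansB enter leave t, Mx enter leave t, evS enter leave t)
        ((t : Int), leave[t])
      = (ansB enter leave (t + 1), Mx enter leave (t + 1), evS enter leave (t + 1)) := by
  have hnum : leave[t] ∈ enter := hmem _ (List.getElem_mem ht)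
  have hct := ent_cast enter leave t
  have hct1 := ent_cast enter leave (t + 1)
  have hmx := Mx_succ enter leave t ht
  have hvb := hval _ hnum
  have hE := Edict_get enter hndE hnum
  unfold stepB
  simp only [hE, Option.getD_some]
  by_cases hgt : ((eI enter (leave[t]) : Int)) > Mx enter leave t
  · rw [if_pos hgt]
    have hMx1 : Mx enter leave (t + 1) = (eI enter (leave[t]) : Int) := by omega
    have hfold := evS_fold enter leave t ht hndE hmem (by omega)
    rw [hfold]
    have hget := evS_get enter leave (t + 1) hndE hnum (by omega)
    rw [hget, Option.getD_some]
    rw [show ((eI enter (leave[t]) : Int)) = Mx enter leave (t + 1) from hMx1.symm]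
    unfold ansB
    rw [setOne enter.length (valB enter leave t) (leave[t]) _ hvb.1 hvb.2]
    refine congrArg₂ Prod.mk ?_ (congrArg₂ Prod.mk rfl rfl)
    exact List.map_congr_left (fun j hj => valB_step enter leave t ht hndL j)
  · rw [if_neg hgt]
    have hMx0 : Mx enter leave (t + 1) = Mx enter leave t := by omega
    have hent0 : ent enter leave (t + 1) = ent enter leave t := by omega
    have hev0 : evS enter leave (t + 1) = evS enter leave t := by
      unfold evS
      rw [hent0]
    have hget := evS_get enter leave t hndE hnum (by omega)
    rw [hget, Option.getD_some, hev0, hMx0]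
    unfold ansB
    rw [setOne enter.length (valB enter leave t) (leave[t]) _ hvb.1 hvb.2]
    refine congrArg₂ Prod.mk ?_ (congrArg₂ Prod.mk rfl rfl)
    simp only [← hMx0]
    exact List.map_congr_left (fun j hj => valB_step enter leave t ht hndL j)

lemma foldB_eq (enter leave : List Int)
    (hndE : enter.Nodup) (hndL : leave.Nodup) (hmem : ∀ p ∈ leave, p ∈ enter)
    (hval : ∀ p ∈ enter, 1 ≤ p ∧ p ≤ (enter.length : Int)) :
    ∀ t, t ≤ leave.length →
      (PySem.List.enumerate (leave.take t) 0).foldl (stepB enter (Edict enter))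
          (List.replicate enter.length 0, -1, PySem.Dict.empty)
        = (ansB enter leave t, Mx enter leave t, evS enter leave t) := by
  intro t
  induction t with
  | zero =>
    intro _
    rw [List.take_zero, PySem.List.enumerate_nil, List.foldl_nil]
    have h1 : ansB enter leave 0 = List.replicate enter.length 0 := by
      unfold ansB
      have hz : ∀ j ∈ List.range enter.length, valB enter leave 0 j = (fun _ => (0 : Int)) j := by
        intro j _
        unfold valB
        rw [List.take_zero]
        simp
      rw [List.map_congr_left hz, List.map_const', List.length_range]
    rw [h1]
    rfl
  | succ t ih =>
    intro h
    rw [take_succ_leave leave t (by omega), PySem.List.enumerate_append, List.foldl_append,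
      ih (by omega)]
    have hlen : ((0 : Int) + ((leave.take t).length : Int)) = (t : Int) := by
      rw [List.length_take_of_le (by omega)]
      ring
    rw [hlen, PySem.List.enumerate_cons, PySem.List.enumerate_nil, List.foldl_cons, List.foldl_nil]
    exact stepB_eq enter leave t (by omega) hndE hndL hmem hval

-- ===== VERDICT (by name: the statement is the Claim_ definition above) =====
theorem solution_spec : Claim_equal_solution := by
  intro enter leave _ hpre
  rcases hpre with hnil | ⟨hE, hL⟩
  · subst hnil
    show solution enter [] = solution_alt enter []
    rfl
  have hndE : enter.Nodup := by
    refine hE.nodup_iff.2 ?_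
    exact (List.nodup_range).map (fun a b h => by omega)

  have hndL : leave.Nodup := hL.nodup_iff.2 hndE
  have hlen : leave.length = enter.length := hL.length_eq
  have hmem : ∀ p ∈ leave, p ∈ enter := fun p hp => hL.mem_iff.1 hp
  have hval : ∀ p ∈ enter, 1 ≤ p ∧ p ≤ (enter.length : Int) := by
    intro p hp
    obtain ⟨i, hi, rfl⟩ := List.mem_map.1 (hE.mem_iff.1 hp)
    rw [List.mem_range] at hi
    omega
  have hmem2 : ∀ j : Nat, j < enter.length → ((j : Int) + 1) ∈ enter := by
    intro j hj
    exact hE.mem_iff.2 (List.mem_map.2 ⟨j, List.mem_range.2 hj, rfl⟩)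
  have hA : solution enter leave = ansA enter leave leave.length := by
    have h := foldA_eq enter leave hndE hndL hmem hval hmem2 leave.length (le_refl _)
    rw [List.take_length] at h
    unfold solution
    rw [h]
  have hB : solution_alt enter leave = ansB enter leave leave.length := by
    have h := foldB_eq enter leave hndE hndL hmem hval leave.length (le_refl _)
    rw [List.take_length] at h
    show ((PySem.List.enumerate leave 0).foldl (stepB enter (Edict enter))
      (List.replicate enter.length 0, -1, PySem.Dict.empty)).1 = _
    rw [h]
  show solution enter leave = solution_alt enter leave
  rw [hA, hB]
  unfold ansA ansB
  apply List.map_congr_left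
  intro j hj
  rw [List.mem_range] at hj
  have hpl : ((j : Int) + 1) ∈ leave.take leave.length := by
    rw [List.take_length]
    exact hL.mem_iff.2 (hmem2 j hj)
  unfold valA valB
  rw [if_pos hpl, if_pos hpl]
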